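-- pv_equiv track=rewrite | github.com/pamfilos/workflows | dags/common/parsing/generic_parsing.py | clear_unnecessary_fields
-- ===== SOURCE A (Python) =====
-- def clear_unnecessary_fields(article):
--     new_article = article.copy()
--     field_list = [
--         "journal_title",
--         "journal_volume",
--         "journal_year",
--         "journal_issue",
--         "journal_artid",
--         "journal_fpage",
--         "journal_lpage",
--         "journal_doctype",
--         "pubinfo_freetext",
--         "related_article_doi",
--     ]
--     [new_article.pop(field_name, "") for field_name in field_list]
--     return new_article
-- ===== SOURCE B (Python) =====
-- def _is_excluded(key):
--     return key in (
--         "journal_title",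
--         "journal_volume",
--         "journal_year",
--         "journal_issue",
--         "journal_artid",
--         "journal_fpage",
--         "journal_lpage",
--         "journal_doctype",
--         "pubinfo_freetext",
--         "related_article_doi",
--     )
--
--
-- def clear_unnecessary_fields(article):
--     kept = []
--     for key, value in article.items():
--         if not _is_excluded(key):
--             kept.append((key, value))
--     return dict(kept)
-- ===== Notes on version B (the rewrite author's own statement) =====
-- stated objective: alternative
-- what changed: Instead of copying the dict and popping each of the ten unwanted fields one by one, B makes a single pass over the article's items with an accumulator, appending a pair only when a per-key predicate does not mark it excluded, and builds the result dict from the kept pairs.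
import Mathlib
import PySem

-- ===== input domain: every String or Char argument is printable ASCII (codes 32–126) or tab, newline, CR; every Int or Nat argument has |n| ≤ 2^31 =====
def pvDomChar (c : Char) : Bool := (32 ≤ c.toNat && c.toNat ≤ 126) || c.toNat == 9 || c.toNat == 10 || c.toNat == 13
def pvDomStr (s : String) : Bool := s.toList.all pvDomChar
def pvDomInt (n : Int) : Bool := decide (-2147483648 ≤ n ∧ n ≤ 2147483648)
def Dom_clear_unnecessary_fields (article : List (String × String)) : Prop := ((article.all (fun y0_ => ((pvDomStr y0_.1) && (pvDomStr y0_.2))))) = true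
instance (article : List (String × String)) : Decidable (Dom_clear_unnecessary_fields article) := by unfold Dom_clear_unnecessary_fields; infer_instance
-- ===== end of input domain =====

-- B replaces A's copy-then-pop-ten-fields loop with one accumulator pass over the items, keeping pairs a per-key predicate does not mark as excluded; objective: alternative.

-- ===== PORT A =====
-- A: new_article = article.copy(); pop each field of field_list (pop with a default never raises,
-- so only the removal effect remains, ported as Dict.erase); return new_article.
def clear_unnecessary_fields (article : List (String × String)) : List (String × String) :=
  let new_article : PySem.Dict String String := PySem.Dict.mk article
  let field_list : List String :=
    [ "journal_title", "journal_volume", "journal_year", "journal_issue", "journal_artid",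
      "journal_fpage", "journal_lpage", "journal_doctype", "pubinfo_freetext", "related_article_doi" ]
  (field_list.foldl (fun d field_name => PySem.Dict.erase d field_name) new_article).items

-- ===== PORT B =====
-- `key in (tuple literal)` ported as the disjunction of the ten equality tests.
def pvIsExcluded (key : String) : Bool :=
  key == "journal_title" || key == "journal_volume" || key == "journal_year" ||
  key == "journal_issue" || key == "journal_artid" || key == "journal_fpage" ||
  key == "journal_lpage" || key == "journal_doctype" || key == "pubinfo_freetext" ||
  key == "related_article_doi"

def clear_unnecessary_fields_alt (article : List (String × String)) : List (String × String) :=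
  let kept : List (String × String) :=
    article.foldl (fun kept kv => if !(pvIsExcluded kv.1) then kept ++ [kv] else kept) []
  (PySem.Dict.mk kept).items

-- ===== PRECONDITION & SPEC =====
def Spec_clear_unnecessary_fields (article : List (String × String)) (out : List (String × String)) : Prop := out = clear_unnecessary_fields_alt article
instance (article : List (String × String)) (out : List (String × String)) : Decidable (Spec_clear_unnecessary_fields article out) := by unfold Spec_clear_unnecessary_fields; infer_instance

-- ===== CLAIM (what is proved, stated in full; the proofs are below) =====
def Claim_equal_clear_unnecessary_fields : Prop := ∀ (article : List (String × String)), Dom_clear_unnecessary_fields article → Spec_clear_unnecessary_fields article (clear_unnecessary_fields article)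

-- ===== LEMMAS AND PROOFS =====
-- Folding Dict.erase over a key list filters out exactly the pairs whose key occurs in that list.
theorem foldl_erase_items (fields : List String) (xs : List (String × String)) :
    (fields.foldl (fun d k => PySem.Dict.erase d k) (PySem.Dict.mk xs)).items
      = xs.filter (fun p => !(fields.contains p.1)) := by
  induction fields generalizing xs with
  | nil => simp
  | cons k fs ih =>
      rw [List.foldl_cons,
        show PySem.Dict.erase (PySem.Dict.mk xs) k
            = PySem.Dict.mk (xs.filter (fun p => !(p.1 == k))) from rfl,
        ih, List.filter_filter]
      apply List.filter_congr
      intro p _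
      by_cases h : p.1 = k <;> simp [h]

-- ===== VERDICT (by name: the statement is the Claim_ definition above) =====
theorem clear_unnecessary_fields_spec : Claim_equal_clear_unnecessary_fields := by
  intro article _
  show _ = _
  simp only [clear_unnecessary_fields, clear_unnecessary_fields_alt, foldl_erase_items,
    PySem.List.foldl_append_if_eq_filter]
  apply List.filter_congr
  intro p _
  rw [Bool.eq_iff_iff]
  simp [pvIsExcluded]
  tauto
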